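-- pv_equiv track=rewrite | github.com/imReese/NexusKV | tools/generate_contracts.py | rust_type
-- ===== SOURCE A (Python) =====
-- def rust_type(type_name: str) -> str:
--     if type_name == "string":
--         return "String"
--     if type_name == "int":
--         return "u32"
--     if type_name == "bool":
--         return "bool"
--     if type_name.startswith("optional[") and type_name.endswith("]"):
--         return f"Option<{rust_type(type_name[9:-1])}>"
--     if type_name.startswith("list[") and type_name.endswith("]"):
--         return f"Vec<{rust_type(type_name[5:-1])}>"
--     if type_name == "map[string,string]":
--         return "BTreeMap<String, String>"
--     return type_name
-- ===== SOURCE B (Python) =====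
-- def rust_type(type_name: str) -> str:
--     # Peel wrapper prefixes iteratively onto a stack, map the core, rebuild outward.
--     wrappers = []
--     s = type_name
--     while True:
--         if s.startswith("optional[") and s.endswith("]"):
--             wrappers.append(("Option<", ">"))
--             s = s[9:-1]
--         elif s.startswith("list[") and s.endswith("]"):
--             wrappers.append(("Vec<", ">"))
--             s = s[5:-1]
--         else:
--             break
--     base = {
--         "string": "String",
--         "int": "u32",
--         "bool": "bool",
--         "map[string,string]": "BTreeMap<String, String>",
--     }
--     out = base.get(s, s)
--     for open_, close_ in reversed(wrappers):
--         out = open_ + out + close_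
--     return out
-- ===== Notes on version B (the rewrite author's own statement) =====
-- stated objective: alternative
-- what changed: Replaces A's recursive descent (each level re-dispatches and wraps via an f-string on the way back up the call stack) with an iterative peel loop that strips wrapper prefixes onto an explicit stack, a single dict lookup for the core type, and a rebuild loop that concatenates the saved bracket pairs back on.
import Mathlib
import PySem

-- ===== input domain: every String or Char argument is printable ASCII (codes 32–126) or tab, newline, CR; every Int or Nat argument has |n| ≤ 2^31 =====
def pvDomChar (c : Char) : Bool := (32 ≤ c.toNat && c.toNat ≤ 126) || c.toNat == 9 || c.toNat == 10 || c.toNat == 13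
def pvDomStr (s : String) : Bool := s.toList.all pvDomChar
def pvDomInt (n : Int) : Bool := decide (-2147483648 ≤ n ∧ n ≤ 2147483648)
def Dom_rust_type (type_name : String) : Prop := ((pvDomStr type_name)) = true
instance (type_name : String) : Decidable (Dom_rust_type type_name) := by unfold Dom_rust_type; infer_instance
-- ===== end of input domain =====

-- B re-implements A's recursive type mapper as an iterative peel-wrappers/map-core/rebuild loop (objective: alternative decomposition, same cost).

-- termination helper for both ports: s[k:-1] is strictly shorter than s when 0 < k ≤ len s
theorem pvSliceLenLt (s : List Char) (k : Nat) (hk : 0 < k) (h : k ≤ s.length) :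
    (PySem.Chars.slice s (some (k : Int)) (some (-1))).length < s.length := by
  have hne : s ≠ [] := by intro e; subst e; simp at h; omega
  rw [PySem.Chars.slice_eq_listSlice, PySem.List.length_slice]
  simp [PySem.List.clampIdx]
  split_ifs <;> simp_all <;> omega

theorem pvOptPrefixLen (s : List Char) (h : (PySem.Chars.startswith s "optional[".toList && PySem.Chars.endswith s "]".toList) = true) :
    9 ≤ s.length := by
  have := (PySem.Chars.startswith_iff s "optional[".toList).mp (by simpa using (Bool.and_elim_left h))
  simpa using this.length_le

theorem pvListPrefixLen (s : List Char) (h : (PySem.Chars.startswith s "list[".toList && PySem.Chars.endswith s "]".toList) = true) :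
    5 ≤ s.length := by
  have := (PySem.Chars.startswith_iff s "list[".toList).mp (by simpa using (Bool.and_elim_left h))
  simpa using this.length_le

-- ===== PORT A =====
-- literal transliteration of A on code points (PySem string ops are defined on List Char)
def rustAChars (s : List Char) : List Char :=
  if s = "string".toList then "String".toList
  else if s = "int".toList then "u32".toList
  else if s = "bool".toList then "bool".toList
  else if h1 : (PySem.Chars.startswith s "optional[".toList && PySem.Chars.endswith s "]".toList) = true then
    "Option<".toList ++ rustAChars (PySem.Chars.slice s (some 9) (some (-1))) ++ ">".toList
  else if h2 : (PySem.Chars.startswith s "list[".toList && PySem.Chars.endswith s "]".toList) = true then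
    "Vec<".toList ++ rustAChars (PySem.Chars.slice s (some 5) (some (-1))) ++ ">".toList
  else if s = "map[string,string]".toList then "BTreeMap<String, String>".toList
  else s
termination_by s.length
decreasing_by
  · simpa using pvSliceLenLt s 9 (by omega) (pvOptPrefixLen s h1)
  · simpa using pvSliceLenLt s 5 (by omega) (pvListPrefixLen s h2)

def rust_type (type_name : String) : String :=
  String.ofList (rustAChars type_name.toList)

-- ===== PORT B =====
-- the while-loop of Source B: strip one wrapper per step, appending its bracket pair
def peelB (s : List Char) (ws : List (List Char × List Char)) :
    List (List Char × List Char) × List Char :=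
  if h1 : (PySem.Chars.startswith s "optional[".toList && PySem.Chars.endswith s "]".toList) = true then
    peelB (PySem.Chars.slice s (some 9) (some (-1))) (ws ++ [("Option<".toList, ">".toList)])
  else if h2 : (PySem.Chars.startswith s "list[".toList && PySem.Chars.endswith s "]".toList) = true then
    peelB (PySem.Chars.slice s (some 5) (some (-1))) (ws ++ [("Vec<".toList, ">".toList)])
  else (ws, s)
termination_by s.length
decreasing_by
  · simpa using pvSliceLenLt s 9 (by omega) (pvOptPrefixLen s h1)
  · simpa using pvSliceLenLt s 5 (by omega) (pvListPrefixLen s h2)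

-- Source B's base-type dict
def baseB : PySem.Dict (List Char) (List Char) :=
  PySem.Dict.ofList
    [("string".toList, "String".toList),
     ("int".toList, "u32".toList),
     ("bool".toList, "bool".toList),
     ("map[string,string]".toList, "BTreeMap<String, String>".toList)]

-- body of Source B's rebuild loop
def wrapStep (out : List Char) (p : List Char × List Char) : List Char := p.1 ++ out ++ p.2

def rust_type_alt (type_name : String) : String :=
  let r := peelB type_name.toList []
  let core := PySem.Dict.getD baseB r.2 r.2
  String.ofList (r.1.reverse.foldl wrapStep core)

-- ===== PRECONDITION & SPEC =====
def Spec_rust_type (type_name : String) (out : String) : Prop := out = rust_type_alt type_name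
instance (type_name : String) (out : String) : Decidable (Spec_rust_type type_name out) := by unfold Spec_rust_type; infer_instance

-- ===== CLAIM (what is proved, stated in full; the proofs are below) =====
def Claim_equal_rust_type : Prop := ∀ (type_name : String), Dom_rust_type type_name → Spec_rust_type type_name (rust_type type_name)

-- ===== LEMMAS AND PROOFS =====

theorem wrap_append (ws : List (List Char × List Char)) (p : List Char × List Char) (core : List Char) :
    (ws ++ [p]).reverse.foldl wrapStep core = ws.reverse.foldl wrapStep (p.1 ++ core ++ p.2) := by
  simp [wrapStep]

-- when neither wrapper condition holds, the base dict lookup equals A's base mapping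
theorem base_eq (s : List Char)
    (h1 : ¬ (PySem.Chars.startswith s "optional[".toList && PySem.Chars.endswith s "]".toList) = true)
    (h2 : ¬ (PySem.Chars.startswith s "list[".toList && PySem.Chars.endswith s "]".toList) = true) :
    PySem.Dict.getD baseB s s = rustAChars s := by
  by_cases e1 : s = "string".toList
  · subst e1; rw [rustAChars]; simp [baseB]; decide
  by_cases e2 : s = "int".toList
  · subst e2; rw [rustAChars]
    rw [if_neg (by decide)]
    simp [baseB]; decide
  by_cases e3 : s = "bool".toList
  · subst e3; rw [rustAChars]
    rw [if_neg (by decide), if_neg (by decide)]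
    simp [baseB]; decide
  by_cases e4 : s = "map[string,string]".toList
  · subst e4; rw [rustAChars]
    rw [if_neg (by decide), if_neg (by decide), if_neg (by decide),
        dif_neg (by decide), dif_neg (by decide)]
    simp [baseB]; decide
  rw [rustAChars]
  rw [if_neg e1, if_neg e2, if_neg e3, dif_neg h1, dif_neg h2, if_neg e4]
  have f1 : ((['s','t','r','i','n','g'] : List Char) == s) = false := by simpa using Ne.symm e1
  have f2 : ((['i','n','t'] : List Char) == s) = false := by simpa using Ne.symm e2
  have f3 : ((['b','o','o','l'] : List Char) == s) = false := by simpa using Ne.symm e3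
  have f4 : ((['m','a','p','[','s','t','r','i','n','g',',','s','t','r','i','n','g',']'] : List Char) == s) = false := by
    simpa using Ne.symm e4
  simp [baseB, PySem.Dict.getD, PySem.Dict.get?, PySem.Dict.ofList, PySem.Dict.update,
    PySem.Dict.empty, PySem.Dict.insert, List.find?, f1, f2, f3, f4]

theorem peel_wrap : ∀ (n : Nat) (s : List Char), s.length ≤ n → ∀ (ws : List (List Char × List Char)),
    ((peelB s ws).1.reverse.foldl wrapStep
        (PySem.Dict.getD baseB (peelB s ws).2 (peelB s ws).2))
      = ws.reverse.foldl wrapStep (rustAChars s) := by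
  intro n
  induction n with
  | zero =>
    intro s hs ws
    have hs0 : s = [] := List.length_eq_zero_iff.mp (Nat.le_zero.mp hs)
    subst hs0
    rw [peelB]
    rw [dif_neg (by decide), dif_neg (by decide)]
    rw [rustAChars]
    rw [if_neg (by decide), if_neg (by decide), if_neg (by decide),
        dif_neg (by decide), dif_neg (by decide), if_neg (by decide)]
    rw [show PySem.Dict.getD baseB [] [] = ([] : List Char) from rfl]
  | succ m ih =>
    intro s hs ws
    by_cases h1 : (PySem.Chars.startswith s "optional[".toList && PySem.Chars.endswith s "]".toList) = true
    · have hlen := pvOptPrefixLen s h1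
      have hlt : (PySem.Chars.slice s (some 9) (some (-1))).length < s.length := by
        simpa using pvSliceLenLt s 9 (by omega) hlen
      rw [peelB]; simp only [dif_pos h1]
      rw [ih _ (by omega), wrap_append]
      conv_rhs => rw [rustAChars]
      rw [if_neg (fun he => absurd h1 (by rw [he]; decide)),
          if_neg (fun he => absurd h1 (by rw [he]; decide)),
          if_neg (fun he => absurd h1 (by rw [he]; decide)),
          dif_pos h1]
    · by_cases h2 : (PySem.Chars.startswith s "list[".toList && PySem.Chars.endswith s "]".toList) = true
      · have hlen := pvListPrefixLen s h2
        have hlt : (PySem.Chars.slice s (some 5) (some (-1))).length < s.length := by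
          simpa using pvSliceLenLt s 5 (by omega) hlen
        rw [peelB]; simp only [dif_neg h1, dif_pos h2]
        rw [ih _ (by omega), wrap_append]
        conv_rhs => rw [rustAChars]
        rw [if_neg (fun he => absurd h2 (by rw [he]; decide)),
            if_neg (fun he => absurd h2 (by rw [he]; decide)),
            if_neg (fun he => absurd h2 (by rw [he]; decide)),
            dif_neg h1, dif_pos h2]
      · rw [peelB]; simp only [dif_neg h1, dif_neg h2]
        exact congrArg (fun c => List.foldl wrapStep c ws.reverse) (base_eq s h1 h2)

-- ===== VERDICT (by name: the statement is the Claim_ definition above) =====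
theorem rust_type_spec : Claim_equal_rust_type := by
  intro type_name _
  unfold Spec_rust_type rust_type rust_type_alt
  exact congrArg String.ofList (peel_wrap type_name.toList.length type_name.toList le_rfl []).symm
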